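-- pv_equiv track=rewrite | github.com/DiogoSantos3/CD | Trabalho2/ex2.py | crc4
-- ===== SOURCE A (Python) =====
-- def crc4(msg_bin_str):
--     gen = '11111'  # g(x) = x^4 + x^3 + x^2 + x + 1
--     m = msg_bin_str + '0000'
--     m = list(m)
--     for i in range(len(msg_bin_str)):
--         if m[i] == '1':
--             for j in range(len(gen)):
--                 m[i + j] = str(int(m[i + j] != gen[j]))
--     return ''.join(m[-4:])
-- ===== SOURCE B (Python) =====
-- def crc4(msg_bin_str):
--     # Shift-register CRC: one pass, a 4-bit register instead of an in-place long division.
--     reg = 0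
--     for c in msg_bin_str + '0000':
--         reg = (reg << 1) | (1 if c == '1' else 0)
--         if reg & 0x10:
--             reg ^= 0x1F
--     return format(reg, '04b')
-- ===== Notes on version B (the rewrite author's own statement) =====
-- stated objective: alternative
-- what changed: Replaced A's in-place polynomial long division over a copied char list (nested loop XORing the 5-bit generator wherever a leading 1 appears, then slicing the last 4 chars) by a one-pass 4-bit shift-register CRC: fold one register over the padded message and format its 4 bits at the end.
import Mathlib
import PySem

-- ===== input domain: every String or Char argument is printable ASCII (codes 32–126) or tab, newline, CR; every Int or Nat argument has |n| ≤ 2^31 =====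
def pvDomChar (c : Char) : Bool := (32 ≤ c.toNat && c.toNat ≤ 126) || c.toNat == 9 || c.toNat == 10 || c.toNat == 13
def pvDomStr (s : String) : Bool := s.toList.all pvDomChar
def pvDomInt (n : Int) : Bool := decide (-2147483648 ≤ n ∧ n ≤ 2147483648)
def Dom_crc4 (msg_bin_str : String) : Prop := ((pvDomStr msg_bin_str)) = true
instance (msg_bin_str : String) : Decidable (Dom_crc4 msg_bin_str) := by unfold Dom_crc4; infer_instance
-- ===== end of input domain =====

-- B replaces A's in-place polynomial long division over a char list by a one-pass 4-bit
-- shift-register CRC (objective: alternative/idiomatic; same O(n) cost, O(1) state instead of a full copy).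

-- ===== PORT A =====
-- gen = '11111'
def crc4_gen : List Char := "11111".toList

-- body of A's outer loop: if m[i] == '1', XOR the generator into m at offset i
-- (indices i and i + j are provably in range, so m[..] / m[..] = .. use List.getD / List.set)
def crc4_body (m : List Char) (i : Nat) : List Char :=
  if m.getD i ' ' = '1' then
    (List.range crc4_gen.length).foldl
      (fun m j => m.set (i + j) (if m.getD (i + j) ' ' ≠ crc4_gen.getD j ' ' then '1' else '0')) m
  else m

def crc4 (msg_bin_str : String) : String :=
  let m0 : List Char := msg_bin_str.toList ++ ['0', '0', '0', '0']  -- list(msg_bin_str + '0000')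
  let m := (List.range msg_bin_str.toList.length).foldl crc4_body m0
  String.ofList (PySem.List.slice m (some (-4)) none)  -- ''.join(m[-4:])

-- ===== PORT B =====
-- 1 if c == '1' else 0
def crc4_bitOf (c : Char) : Nat := if c = '1' then 1 else 0

-- one shift-register step: reg = (reg << 1) | bit; if reg & 0x10: reg ^= 0x1F
def crc4_step (reg : Nat) (c : Char) : Nat :=
  let r := (reg <<< 1) ||| crc4_bitOf c
  if r &&& 16 ≠ 0 then r ^^^ 31 else r

def crc4_alt (msg_bin_str : String) : String :=
  let reg := (msg_bin_str.toList ++ ['0', '0', '0', '0']).foldl crc4_step 0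
  -- format(reg, '04b'): exact, since the loop keeps reg < 16
  String.ofList [if reg / 8 % 2 = 1 then '1' else '0',
                 if reg / 4 % 2 = 1 then '1' else '0',
                 if reg / 2 % 2 = 1 then '1' else '0',
                 if reg % 2 = 1 then '1' else '0']

-- ===== PRECONDITION & SPEC =====
def Spec_crc4 (msg_bin_str : String) (out : String) : Prop := out = crc4_alt msg_bin_str
instance (msg_bin_str : String) (out : String) : Decidable (Spec_crc4 msg_bin_str out) := by unfold Spec_crc4; infer_instance

-- ===== CLAIM (what is proved, stated in full; the proofs are below) =====
def Claim_equal_crc4 : Prop := ∀ (msg_bin_str : String), Dom_crc4 msg_bin_str → Spec_crc4 msg_bin_str (crc4 msg_bin_str)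

-- ===== LEMMAS AND PROOFS =====

-- the flipped char A writes: str(int(c != '1'))
def crc4_flip (c : Char) : Char := if c ≠ '1' then '1' else '0'

-- the 4-bit value of a window of four chars
def crc4_regOf (a b c d : Char) : Nat :=
  8 * crc4_bitOf a + 4 * crc4_bitOf b + 2 * crc4_bitOf c + crc4_bitOf d

theorem crc4_bitOf_lt (c : Char) : crc4_bitOf c < 2 := by
  unfold crc4_bitOf; split <;> omega

theorem crc4_bitOf_flip (c : Char) : crc4_bitOf (crc4_flip c) = 1 - crc4_bitOf c := by
  by_cases h : c = '1' <;> simp [crc4_flip, crc4_bitOf, h]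

theorem crc4_bitOf_one (a : Char) : (a = '1') ↔ crc4_bitOf a = 1 := by
  unfold crc4_bitOf; split <;> simp_all

theorem crc4_step_arith : ∀ w < 2, ∀ x < 2, ∀ y < 2, ∀ z < 2, ∀ v < 2,
    (let r := ((8 * w + 4 * x + 2 * y + z) <<< 1) ||| v;
     if r &&& 16 ≠ 0 then r ^^^ 31 else r)
    = if w = 1 then 8 * (1 - x) + 4 * (1 - y) + 2 * (1 - z) + (1 - v)
      else 8 * x + 4 * y + 2 * z + v := by decide

-- B's step, on the 4-bit value of a 5-char window
theorem crc4_step_window (a b c d e : Char) :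
    crc4_step (crc4_regOf a b c d) e =
    if a = '1' then crc4_regOf (crc4_flip b) (crc4_flip c) (crc4_flip d) (crc4_flip e)
    else crc4_regOf b c d e := by
  have h := crc4_step_arith (crc4_bitOf a) (crc4_bitOf_lt a) (crc4_bitOf b) (crc4_bitOf_lt b)
    (crc4_bitOf c) (crc4_bitOf_lt c) (crc4_bitOf d) (crc4_bitOf_lt d) (crc4_bitOf e) (crc4_bitOf_lt e)
  simp only [crc4_step, crc4_regOf, h, crc4_bitOf_flip, crc4_bitOf_one]

theorem getD_app (pre l : List Char) (j : Nat) (d : Char) :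
    (pre ++ l).getD (pre.length + j) d = l.getD j d := by
  simp [List.getD_eq_getElem?_getD, List.getElem?_append_right]

-- A's step, on a window of five chars after an untouched prefix
theorem crc4_body_step (pre : List Char) (a b c d e : Char) (rest : List Char) :
    crc4_body (pre ++ a :: b :: c :: d :: e :: rest) pre.length =
    if a = '1' then
      pre ++ '0' :: crc4_flip b :: crc4_flip c :: crc4_flip d :: crc4_flip e :: rest
    else pre ++ a :: b :: c :: d :: e :: rest := by
  have hr : List.range crc4_gen.length = [0, 1, 2, 3, 4] := by decide
  unfold crc4_body
  rw [hr]
  have h0 : (pre ++ a :: b :: c :: d :: e :: rest).getD pre.length ' ' = a := by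
    have := getD_app pre (a :: b :: c :: d :: e :: rest) 0 ' '; simpa using this
  rw [h0]
  by_cases ha : a = '1'
  · simp only [ha, List.foldl]
    simp only [show crc4_gen = ['1', '1', '1', '1', '1'] from by decide]
    simp [crc4_flip, List.getD]
  · simp [ha]

theorem crc4_init (a b c d : Char) :
    List.foldl crc4_step 0 [a, b, c, d] = crc4_regOf a b c d := by
  have h : ∀ x y z e, crc4_step (crc4_regOf '0' x y z) e = crc4_regOf x y z e := by
    intro x y z e; rw [crc4_step_window]; simp
  show crc4_step (crc4_step (crc4_step (crc4_step 0 a) b) c) d = _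
  rw [show (0 : Nat) = crc4_regOf '0' '0' '0' '0' from rfl, h, h, h, h]

theorem crc4_exists4 (l : List Char) (h : 4 ≤ l.length) :
    ∃ a b c d t, l = a :: b :: c :: d :: t := by
  rcases l with _ | ⟨a, _ | ⟨b, _ | ⟨c, _ | ⟨d, t⟩⟩⟩⟩ <;> simp at h <;>
    exact ⟨a, b, c, d, t, rfl⟩

-- main loop invariant: after i steps of A the list is an untouched-or-cleared prefix,
-- a 4-char window whose 4-bit value is B's register after i+4 shift steps, and the
-- untouched tail; window chars are binary or still original
theorem crc4_loop (s : List Char) : ∀ i, i ≤ s.length →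
    ∃ pre a b c d, pre.length = i ∧
      (List.range i).foldl crc4_body (s ++ ['0','0','0','0'])
        = pre ++ a :: b :: c :: d :: (s ++ ['0','0','0','0']).drop (i + 4) ∧
      ((s ++ ['0','0','0','0']).take (i + 4)).foldl crc4_step 0 = crc4_regOf a b c d ∧
      (a = '0' ∨ a = '1' ∨ a = (s ++ ['0','0','0','0']).getD i ' ') ∧
      (b = '0' ∨ b = '1' ∨ b = (s ++ ['0','0','0','0']).getD (i+1) ' ') ∧
      (c = '0' ∨ c = '1' ∨ c = (s ++ ['0','0','0','0']).getD (i+2) ' ') ∧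
      (d = '0' ∨ d = '1' ∨ d = (s ++ ['0','0','0','0']).getD (i+3) ' ') := by
  set full := s ++ ['0','0','0','0'] with hfull
  have hflen : full.length = s.length + 4 := by simp [hfull]
  intro i
  induction i with
  | zero =>
    intro _
    obtain ⟨a, b, c, d, t, hdec⟩ := crc4_exists4 full (by omega)
    refine ⟨[], a, b, c, d, rfl, ?_, ?_, ?_, ?_, ?_, ?_⟩
    · simp [hdec]
    · rw [hdec]; exact crc4_init a b c d
    · rw [hdec]; exact Or.inr (Or.inr rfl)
    · rw [hdec]; exact Or.inr (Or.inr rfl)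
    · rw [hdec]; exact Or.inr (Or.inr rfl)
    · rw [hdec]; exact Or.inr (Or.inr rfl)
  | succ i ih =>
    intro hle
    obtain ⟨pre, a, b, c, d, hlen, hm, hreg, hPa, hPb, hPc, hPd⟩ := ih (by omega)
    have hlt : i + 4 < full.length := by omega
    set e := full.getD (i + 4) ' ' with he
    have hdrop : full.drop (i + 4) = e :: full.drop (i + 5) := by
      rw [List.drop_eq_getElem_cons hlt, he, List.getD_eq_getElem full ' ' hlt]
    have htake : full.take (i + 5) = full.take (i + 4) ++ [e] := by
      rw [show i + 5 = (i + 4) + 1 from rfl, List.take_succ_eq_append_getElem hlt,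
        he, List.getD_eq_getElem full ' ' hlt]
    have hstep : (List.range (i + 1)).foldl crc4_body full
        = crc4_body (pre ++ a :: b :: c :: d :: e :: full.drop (i + 5)) pre.length := by
      rw [List.range_succ, List.foldl_append, hm, hdrop, ← hlen]
      rfl
    have hreg' : (full.take (i + 5)).foldl crc4_step 0
        = crc4_step (crc4_regOf a b c d) e := by
      rw [htake, List.foldl_append, hreg]; rfl
    rw [crc4_body_step] at hstep
    by_cases ha : a = '1'
    · refine ⟨pre ++ ['0'], crc4_flip b, crc4_flip c, crc4_flip d, crc4_flip e,
        by simp [hlen], ?_, ?_, ?_, ?_, ?_, ?_⟩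
      · rw [hstep, if_pos ha]; simp
      · rw [hreg', crc4_step_window, if_pos ha]
      all_goals unfold crc4_flip; split <;> simp
    · refine ⟨pre ++ [a], b, c, d, e, by simp [hlen], ?_, ?_, ?_, ?_, ?_, ?_⟩
      · rw [hstep, if_neg ha]; simp
      · rw [hreg', crc4_step_window, if_neg ha]
      · rcases hPb with h | h | h
        · exact Or.inl h
        · exact Or.inr (Or.inl h)
        · exact Or.inr (Or.inr (by rw [h]))
      · rcases hPc with h | h | h
        · exact Or.inl h
        · exact Or.inr (Or.inl h)
        · exact Or.inr (Or.inr (by rw [h]))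
      · rcases hPd with h | h | h
        · exact Or.inl h
        · exact Or.inr (Or.inl h)
        · exact Or.inr (Or.inr (by rw [h]))
      · exact Or.inr (Or.inr (by rw [he]))

-- B's final formatting re-reads a binary 4-char window from its 4-bit value
theorem crc4_roundtrip (a b c d : Char) (ha : a = '0' ∨ a = '1') (hb : b = '0' ∨ b = '1')
    (hc : c = '0' ∨ c = '1') (hd : d = '0' ∨ d = '1') :
    [if crc4_regOf a b c d / 8 % 2 = 1 then '1' else '0',
     if crc4_regOf a b c d / 4 % 2 = 1 then '1' else '0',
     if crc4_regOf a b c d / 2 % 2 = 1 then '1' else '0',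
     if crc4_regOf a b c d % 2 = 1 then '1' else '0'] = [a, b, c, d] := by
  rcases ha with rfl | rfl <;> rcases hb with rfl | rfl <;> rcases hc with rfl | rfl <;>
    rcases hd with rfl | rfl <;> decide

-- ===== VERDICT (by name: the statement is the Claim_ definition above) =====
theorem crc4_spec : Claim_equal_crc4 := by
  intro s _
  unfold Spec_crc4 crc4 crc4_alt
  dsimp only
  obtain ⟨pre, a, b, c, d, hlen, hm, hreg, hPa, hPb, hPc, hPd⟩ :=
    crc4_loop s.toList s.toList.length le_rfl
  set l := s.toList with hl
  have hflen : (l ++ ['0','0','0','0']).length = l.length + 4 := by simp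
  have hdropnil : (l ++ ['0','0','0','0']).drop (l.length + 4) = [] := by
    apply List.drop_eq_nil_of_le; omega
  have htake : (l ++ ['0','0','0','0']).take (l.length + 4) = l ++ ['0','0','0','0'] := by
    rw [← hflen, List.take_length]
  rw [hdropnil] at hm
  rw [htake] at hreg
  have hpad : ∀ k, k < 4 → (l ++ ['0','0','0','0']).getD (l.length + k) ' ' = '0' := by
    intro k hk; rw [getD_app]; interval_cases k <;> rfl
  have ha' : a = '0' ∨ a = '1' := by
    rcases hPa with h | h | h
    · exact Or.inl h
    · exact Or.inr h
    · exact Or.inl (by rw [h]; exact hpad 0 (by omega))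
  have hb' : b = '0' ∨ b = '1' := by
    rcases hPb with h | h | h
    · exact Or.inl h
    · exact Or.inr h
    · exact Or.inl (by rw [h]; exact hpad 1 (by omega))
  have hc' : c = '0' ∨ c = '1' := by
    rcases hPc with h | h | h
    · exact Or.inl h
    · exact Or.inr h
    · exact Or.inl (by rw [h]; exact hpad 2 (by omega))
  have hd' : d = '0' ∨ d = '1' := by
    rcases hPd with h | h | h
    · exact Or.inl h
    · exact Or.inr h
    · exact Or.inl (by rw [h]; exact hpad 3 (by omega))
  rw [hm, hreg, crc4_roundtrip a b c d ha' hb' hc' hd']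
  rw [PySem.List.slice_from_neg_ofNat _ 4 (by omega)]
  have hmlen : (pre ++ [a, b, c, d]).length = l.length + 4 := by simp [hlen]
  rw [hmlen, Nat.add_sub_cancel, ← hlen, List.drop_left]
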